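-- pv_equiv track=rewrite | github.com/GSS-Cogs/family-trade | datasets/ONS-GDP-at-current-prices-real-time-database-YBHA/main.py | month_abrev_to_full_name
-- ===== SOURCE A (Python) =====
-- def month_abrev_to_full_name(some_month_abrev_string):
--     month_dict = {"Jan": "Q1",
--               "Feb": "Q1",
--               "Mar": "Q1",
--               "Apr": "Q2",
--               "May": "Q2",
--               "Jun": "Q2",
--               "Jul": "Q3",
--               "Aug": "Q3",
--               "Sep": "Q3",
--               "Oct": "Q4",
--               "Nov": "Q4",
--               "Dec": "Q4"}
--     find_abrev = filter(lambda abrev_month: abrev_month in some_month_abrev_string, month_dict.keys())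
--     for abrev in find_abrev:
--         some_month_abrev_string = some_month_abrev_string.replace(abrev, str(month_dict[abrev]))
--     return some_month_abrev_string
-- ===== SOURCE B (Python) =====
-- import re
--
-- _MONTH_DICT = {"Jan": "Q1", "Feb": "Q1", "Mar": "Q1",
--                "Apr": "Q2", "May": "Q2", "Jun": "Q2",
--                "Jul": "Q3", "Aug": "Q3", "Sep": "Q3",
--                "Oct": "Q4", "Nov": "Q4", "Dec": "Q4"}
-- _MONTH_RE = re.compile("|".join(_MONTH_DICT))
--
-- def month_abrev_to_full_name(some_month_abrev_string):
--     return _MONTH_RE.sub(lambda m: _MONTH_DICT[m.group()], some_month_abrev_string)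
-- ===== Notes on version B (the rewrite author's own statement) =====
-- stated objective: idiomatic
-- what changed: A loops over the 12 month keys calling str.replace (a full scan of the string) for each; B compiles one regex alternation of the abbreviations and does a single left-to-right re.sub pass that maps each match to its quarter label.
import Mathlib
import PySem

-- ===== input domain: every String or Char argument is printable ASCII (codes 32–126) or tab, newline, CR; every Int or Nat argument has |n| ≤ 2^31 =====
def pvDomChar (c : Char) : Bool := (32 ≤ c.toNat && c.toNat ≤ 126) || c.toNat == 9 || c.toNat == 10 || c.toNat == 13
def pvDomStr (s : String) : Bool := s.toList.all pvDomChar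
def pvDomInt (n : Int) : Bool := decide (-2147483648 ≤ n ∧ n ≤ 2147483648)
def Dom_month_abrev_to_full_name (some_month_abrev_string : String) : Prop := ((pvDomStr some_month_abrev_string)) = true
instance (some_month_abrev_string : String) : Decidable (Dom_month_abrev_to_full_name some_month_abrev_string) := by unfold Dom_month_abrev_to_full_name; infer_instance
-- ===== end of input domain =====

-- B replaces A's 12 sequential str.replace passes (one full scan of the string per month key)
-- by a single regex-style left-to-right pass that substitutes every month abbreviation as it
-- is met (objective: idiomatic / alternative).

-- ===== PORT A =====
-- A: build the month dict, lazily filter the keys contained in the string, and for each such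
-- key replace every occurrence by str(month_dict[key]) — a fold of str.replace over the keys.
def month_abrev_to_full_name (some_month_abrev_string : String) : String :=
  let month_dict : PySem.Dict String String := PySem.Dict.ofList
    [("Jan","Q1"),("Feb","Q1"),("Mar","Q1"),("Apr","Q2"),("May","Q2"),("Jun","Q2"),
     ("Jul","Q3"),("Aug","Q3"),("Sep","Q3"),("Oct","Q4"),("Nov","Q4"),("Dec","Q4")]
  month_dict.keys.foldl
    (fun acc k =>
      -- Python's lazy `filter` evaluates `abrev in some_month_abrev_string` against the
      -- CURRENT (already rebound) string during the loop, hence the test is on acc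
      if PySem.Str.isIn k acc then PySem.Str.replace acc k ((month_dict.get? k).getD "") else acc)
    some_month_abrev_string

-- ===== PORT B =====
-- B (Source B): one compiled regex alternation 'Jan|Feb|…|Dec'; re.sub scans the string left to
-- right once, replacing each match by its quarter label (the sub lambda's dict lookup).
def pvMonthsB : List (List Char × List Char) :=
  [(['J','a','n'],['Q','1']),(['F','e','b'],['Q','1']),(['M','a','r'],['Q','1']),
   (['A','p','r'],['Q','2']),(['M','a','y'],['Q','2']),(['J','u','n'],['Q','2']),
   (['J','u','l'],['Q','3']),(['A','u','g'],['Q','3']),(['S','e','p'],['Q','3']),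
   (['O','c','t'],['Q','4']),(['N','o','v'],['Q','4']),(['D','e','c'],['Q','4'])]

-- the regex engine's choice at the current position: first alternative matching here
def pvFindMonth (l : List Char) : Option (List Char × List Char) :=
  pvMonthsB.find? (fun p => p.1.isPrefixOf l)

-- re.sub's single left-to-right pass: on a match emit the replacement and skip the three
-- matched characters, otherwise emit the character and move on
def pvScanB : List Char → List Char
  | [] => []
  | c :: t =>
    match pvFindMonth (c :: t) with
    | some p => p.2 ++ pvScanB (t.drop 2)
    | none => c :: pvScanB t
termination_by l => l.length
decreasing_by
  · simp [List.length_drop]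
  · simp

def month_abrev_to_full_name_alt (some_month_abrev_string : String) : String :=
  String.ofList (pvScanB some_month_abrev_string.toList)

-- ===== PRECONDITION & SPEC =====
def Spec_month_abrev_to_full_name (some_month_abrev_string : String) (out : String) : Prop := out = month_abrev_to_full_name_alt some_month_abrev_string
instance (some_month_abrev_string : String) (out : String) : Decidable (Spec_month_abrev_to_full_name some_month_abrev_string out) := by unfold Spec_month_abrev_to_full_name; infer_instance

-- ===== CLAIM (what is proved, stated in full; the proofs are below) =====
def Claim_equal_month_abrev_to_full_name : Prop := ∀ (some_month_abrev_string : String), Dom_month_abrev_to_full_name some_month_abrev_string → Spec_month_abrev_to_full_name some_month_abrev_string (month_abrev_to_full_name some_month_abrev_string)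

-- ===== LEMMAS AND PROOFS =====

def pvRep (old new : List Char) : List Char → List Char
  | [] => []
  | c :: t =>
    if old.isPrefixOf (c :: t) then new ++ pvRep old new (t.drop (old.length - 1))
    else c :: pvRep old new t
termination_by l => l.length
decreasing_by
  · simp [List.length_drop]
  · simp

lemma pvRep_go (old new : List Char) (hold : old ≠ []) :
    ∀ (fuel : Nat) (l acc : List Char), l.length ≤ fuel →
      PySem.Chars.replace.go old new fuel l acc = acc.reverse ++ pvRep old new l := by
  intro fuel
  induction fuel with
  | zero =>
    intro l acc hl
    have : l = [] := List.eq_nil_of_length_eq_zero (Nat.le_zero.mp hl)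
    subst this
    rw [PySem.Chars.replace.go.eq_def]
    simp [pvRep]
  | succ fuel ih =>
    intro l acc hl
    match l with
    | [] => rw [PySem.Chars.replace.go.eq_def]; simp [pvRep]
    | c :: t =>
      rw [PySem.Chars.replace.go.eq_def]
      simp only []
      by_cases hpre : old.isPrefixOf (c :: t)
      · obtain ⟨m, hm⟩ : ∃ m, old.length = m + 1 :=
          ⟨old.length - 1, by cases old with | nil => exact absurd rfl hold | cons x xs => simp⟩
        simp only [hpre, if_true]
        have hd : List.drop old.length (c :: t) = t.drop m := by
          rw [hm, List.drop_succ_cons]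
        have hlen : (t.drop m).length ≤ fuel := by
          simp only [List.length_drop]; simp at hl; omega
        rw [hd, ih (t.drop m) (new.reverse ++ acc) hlen]
        conv_rhs => rw [pvRep]
        simp [hpre, hm]
      · simp only [hpre]
        have hlen : t.length ≤ fuel := by simp at hl; omega
        rw [ih t (c :: acc) hlen]
        conv_rhs => rw [pvRep]
        simp [hpre]

lemma pvRep_eq_replace (old new s : List Char) (hold : old ≠ []) :
    PySem.Chars.replace s old new = pvRep old new s := by
  rw [PySem.Chars.replace]
  simp only [List.isEmpty_eq_false_iff.mpr hold]
  simpa using pvRep_go old new hold s.length s [] (Nat.le_refl _)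

def pvFirst : List Char := ['J','F','M','A','S','O','N','D']
def pvNoHead (l : List Char) : Prop := ∀ p ∈ pvMonthsB, ¬ p.1 <+: l
lemma pvKey_shape : ∀ p ∈ pvMonthsB, ∃ a b c, p.1 = [a, b, c] ∧
    a ∈ pvFirst ∧ b ∉ pvFirst ∧ c ∉ pvFirst ∧ b ≠ 'Q' ∧ c ≠ 'Q' := by
  intro p hp; fin_cases hp <;> exact ⟨_, _, _, rfl, by decide, by decide, by decide, by decide, by decide⟩
lemma pvVal_shape : ∀ p ∈ pvMonthsB, ∃ d, p.2 = ['Q', d] ∧ d ∉ pvFirst := by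
  intro p hp; fin_cases hp <;> exact ⟨_, rfl, by decide⟩
lemma pvQ_not_first : 'Q' ∉ pvFirst := by decide

lemma pvRep_cons (old new : List Char) (c : Char) (t : List Char)
    (h : ¬ old <+: (c :: t)) : pvRep old new (c :: t) = c :: pvRep old new t := by
  rw [pvRep, if_neg (fun hb => h (List.isPrefixOf_iff_prefix.mp hb))]

lemma pvRep_of_not_infix (old new : List Char) (l : List Char) (h : ¬ old <:+: l) :
    pvRep old new l = l := by
  induction l with
  | nil => rw [pvRep]
  | cons c t ih =>
    rw [pvRep_cons old new c t (fun hp => h hp.isInfix)]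
    rw [ih (fun hi => h (hi.trans (List.suffix_cons c t).isInfix))]

lemma pvNoHead_rep (p : List Char × List Char) (hp : p ∈ pvMonthsB) (l : List Char)
    (h : pvNoHead l) : pvNoHead (pvRep p.1 p.2 l) := by
  match l with
  | [] =>
    rw [pvRep]
    intro q hq hpre
    obtain ⟨a, b, c, hq1, -⟩ := pvKey_shape q hq
    rw [hq1] at hpre
    simpa using hpre.length_le
  | c :: t =>
    rw [pvRep_cons _ _ c t (h p hp)]
    intro q hq hpre
    obtain ⟨a, b, dd, hq1, -, -, -, hbQ, hdQ⟩ := pvKey_shape q hq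
    rw [hq1] at hpre
    rw [List.cons_prefix_cons] at hpre
    obtain ⟨rfl, hpre⟩ := hpre
    match t with
    | [] =>
      rw [pvRep] at hpre
      simpa using hpre.length_le
    | c1 :: t1 =>
      by_cases h1 : p.1 <+: (c1 :: t1)
      · obtain ⟨d0, hv, -⟩ := pvVal_shape p hp
        rw [pvRep, if_pos (List.isPrefixOf_iff_prefix.mpr h1), hv] at hpre
        simp only [List.cons_append, List.nil_append, List.cons_prefix_cons] at hpre
        exact hbQ hpre.1
      · rw [pvRep_cons _ _ c1 t1 h1, List.cons_prefix_cons] at hpre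
        obtain ⟨rfl, hpre⟩ := hpre
        match t1 with
        | [] =>
          rw [pvRep] at hpre
          simpa using hpre.length_le
        | c2 :: t2 =>
          by_cases h2 : p.1 <+: (c2 :: t2)
          · obtain ⟨d0, hv, -⟩ := pvVal_shape p hp
            rw [pvRep, if_pos (List.isPrefixOf_iff_prefix.mpr h2), hv] at hpre
            simp only [List.cons_append, List.nil_append, List.cons_prefix_cons] at hpre
            exact hdQ hpre.1
          · rw [pvRep_cons _ _ c2 t2 h2, List.cons_prefix_cons] at hpre
            obtain ⟨rfl, -⟩ := hpre
            exact h q hq (by rw [hq1]; simp [List.cons_prefix_cons])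

lemma pvKey_prefix_iff (p q : List Char × List Char) (hp : p ∈ pvMonthsB) (hq : q ∈ pvMonthsB)
    (X : List Char) : q.1 <+: (p.1 ++ X) ↔ q.1 = p.1 := by
  obtain ⟨a, b, c, hp1, -⟩ := pvKey_shape p hp
  obtain ⟨a', b', c', hq1, -⟩ := pvKey_shape q hq
  constructor
  · intro h
    have := List.prefix_iff_eq_take.mp h
    rw [hq1, hp1] at this ⊢
    simpa using this
  · intro h; rw [h]; exact List.prefix_append _ _

lemma pvRep_key_self (p : List Char × List Char) (hp : p ∈ pvMonthsB) (X : List Char) :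
    pvRep p.1 p.2 (p.1 ++ X) = p.2 ++ pvRep p.1 p.2 X := by
  obtain ⟨a, b, c, hp1, -⟩ := pvKey_shape p hp
  rw [hp1]
  simp only [List.cons_append, List.nil_append]
  rw [pvRep, if_pos (List.isPrefixOf_iff_prefix.mpr (by simp [List.cons_prefix_cons]))]
  simp

lemma pvRep_key_block (p q : List Char × List Char) (hp : p ∈ pvMonthsB) (hq : q ∈ pvMonthsB)
    (hne : q.1 ≠ p.1) (X : List Char) : pvRep q.1 q.2 (p.1 ++ X) = p.1 ++ pvRep q.1 q.2 X := by
  obtain ⟨a, b, c, hp1, ha, hb, hc, -⟩ := pvKey_shape p hp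
  obtain ⟨a', b', c', hq1, ha', -⟩ := pvKey_shape q hq
  rw [hp1]
  have h1 : ¬ q.1 <+: (a :: b :: c :: X) := by
    rw [hq1]
    simp only [List.cons_prefix_cons]
    rintro ⟨rfl, rfl, rfl, -⟩
    exact hne (hq1.trans hp1.symm)
  have h2 : ¬ q.1 <+: (b :: c :: X) := by
    rw [hq1, List.cons_prefix_cons]
    rintro ⟨rfl, -⟩; exact hb ha'
  have h3 : ¬ q.1 <+: (c :: X) := by
    rw [hq1, List.cons_prefix_cons]
    rintro ⟨rfl, -⟩; exact hc ha'
  simp only [List.cons_append, List.nil_append]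
  rw [pvRep_cons _ _ _ _ h1, pvRep_cons _ _ _ _ h2, pvRep_cons _ _ _ _ h3]

lemma pvRep_val_block (p q : List Char × List Char) (hp : p ∈ pvMonthsB) (hq : q ∈ pvMonthsB)
    (X : List Char) : pvRep q.1 q.2 (p.2 ++ X) = p.2 ++ pvRep q.1 q.2 X := by
  obtain ⟨d, hv, hd⟩ := pvVal_shape p hp
  obtain ⟨a', b', c', hq1, ha', -⟩ := pvKey_shape q hq
  have h1 : ¬ q.1 <+: ('Q' :: d :: X) := by
    rw [hq1, List.cons_prefix_cons]
    rintro ⟨rfl, -⟩; exact pvQ_not_first ha'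
  have h2 : ¬ q.1 <+: (d :: X) := by
    rw [hq1, List.cons_prefix_cons]
    rintro ⟨rfl, -⟩; exact hd ha'
  rw [hv]
  simp only [List.cons_append, List.nil_append]
  rw [pvRep_cons _ _ _ _ h1, pvRep_cons _ _ _ _ h2]

def pvStepC (acc : List Char) (p : List Char × List Char) : List Char :=
  pvRep p.1 p.2 acc

lemma pvKey_inj : ∀ p ∈ pvMonthsB, ∀ q ∈ pvMonthsB, p.1 = q.1 → p = q := by decide

lemma pvFold_nil (ms : List (List Char × List Char)) : ms.foldl pvStepC [] = [] := by
  induction ms with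
  | nil => rfl
  | cons q ms ih => simpa [pvStepC, List.foldl_cons, pvRep] using ih

lemma pvFold_cons (ms : List (List Char × List Char)) (hms : ∀ p ∈ ms, p ∈ pvMonthsB) :
    ∀ c t, pvNoHead (c :: t) → ms.foldl pvStepC (c :: t) = c :: ms.foldl pvStepC t := by
  induction ms with
  | nil => intro c t _; rfl
  | cons q ms ih =>
    intro c t h
    have hq : q ∈ pvMonthsB := hms q (List.mem_cons_self ..)
    have hstep : pvStepC (c :: t) q = c :: pvRep q.1 q.2 t :=
      pvRep_cons _ _ c t (h q hq)
    have hnh : pvNoHead (c :: pvRep q.1 q.2 t) := by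
      have := pvNoHead_rep q hq (c :: t) h
      rwa [pvRep_cons _ _ c t (h q hq)] at this
    simp only [List.foldl_cons, hstep]
    exact ih (fun p hp => hms p (List.mem_cons_of_mem _ hp)) c (pvRep q.1 q.2 t) hnh

lemma pvFold_val (p : List Char × List Char) (hp : p ∈ pvMonthsB)
    (ms : List (List Char × List Char)) (hms : ∀ q ∈ ms, q ∈ pvMonthsB) :
    ∀ X, ms.foldl pvStepC (p.2 ++ X) = p.2 ++ ms.foldl pvStepC X := by
  induction ms with
  | nil => intro X; rfl
  | cons q ms ih =>
    intro X
    have hq : q ∈ pvMonthsB := hms q (List.mem_cons_self ..)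
    simp only [List.foldl_cons, pvStepC, pvRep_val_block p q hp hq X]
    exact ih (fun r hr => hms r (List.mem_cons_of_mem _ hr)) _

lemma pvFold_key (p : List Char × List Char) (hp : p ∈ pvMonthsB)
    (ms : List (List Char × List Char)) (hms : ∀ q ∈ ms, q ∈ pvMonthsB) :
    ∀ X, ms.foldl pvStepC (p.1 ++ X) =
      (if p ∈ ms then p.2 else p.1) ++ ms.foldl pvStepC X := by
  induction ms with
  | nil => intro X; simp
  | cons q ms ih =>
    intro X
    have hq : q ∈ pvMonthsB := hms q (List.mem_cons_self ..)
    have hms' : ∀ r ∈ ms, r ∈ pvMonthsB := fun r hr => hms r (List.mem_cons_of_mem _ hr)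
    by_cases hqp : q = p
    · subst hqp
      simp only [List.foldl_cons, pvStepC, pvRep_key_self q hq X]
      rw [pvFold_val q hq ms hms']
      simp
    · have hne : q.1 ≠ p.1 := fun h => hqp (pvKey_inj q hq p hp h)
      simp only [List.foldl_cons, pvStepC, pvRep_key_block p q hp hq hne X]
      rw [ih hms']
      have hpq : ¬ p = q := fun h => hqp h.symm
      simp [hpq]

lemma pvFind_none_iff (l : List Char) : pvFindMonth l = none ↔ pvNoHead l := by
  rw [pvFindMonth, List.find?_eq_none]
  constructor
  · intro h p hp hpre
    exact absurd (List.isPrefixOf_iff_prefix.mpr hpre) (by simpa using h p hp)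
  · intro h p hp
    simpa using fun hb => h p hp (List.isPrefixOf_iff_prefix.mp hb)

lemma pvFind_of_pred {α : Type} [BEq α] [LawfulBEq α] (f : α → Bool) (l : List α) (p : α)
    (hp : p ∈ l) (h : ∀ x ∈ l, f x = (x == p)) : l.find? f = some p := by
  induction l with
  | nil => cases hp
  | cons x l ih =>
    by_cases hxp : x = p
    · subst hxp
      rw [List.find?_cons_of_pos (by simpa using h x (List.mem_cons_self ..))]
    · have hx : f x = false := by
        rw [h x (List.mem_cons_self ..)]
        simpa using hxp
      rw [List.find?_cons_of_neg (by simp [hx])]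
      exact ih (by cases hp with
        | head => exact absurd rfl hxp
        | tail _ h' => exact h') (fun x hx => h x (List.mem_cons_of_mem _ hx))

lemma pvFind_key (p : List Char × List Char) (hp : p ∈ pvMonthsB) (X : List Char) :
    pvFindMonth (p.1 ++ X) = some p := by
  rw [pvFindMonth]
  apply pvFind_of_pred _ _ p hp
  intro q hq
  by_cases h : q.1 <+: (p.1 ++ X)
  · have : q = p := pvKey_inj q hq p hp ((pvKey_prefix_iff p q hp hq X).mp h)
    subst this
    simp [List.isPrefixOf_iff_prefix.mpr h]
  · have h2 : q ≠ p := by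
      rintro rfl
      exact h (List.prefix_append _ _)
    have hb : q.1.isPrefixOf (p.1 ++ X) = false := by
      rw [← Bool.not_eq_true, List.isPrefixOf_iff_prefix]; exact h
    simp [hb, h2]

lemma pvMain : ∀ (n : Nat) (l : List Char), l.length ≤ n →
    pvMonthsB.foldl pvStepC l = pvScanB l := by
  intro n
  induction n with
  | zero =>
    intro l hl
    have : l = [] := List.eq_nil_of_length_eq_zero (Nat.le_zero.mp hl)
    subst this
    rw [pvScanB, pvFold_nil]
  | succ n ih =>
    intro l hl
    match l with
    | [] => rw [pvScanB, pvFold_nil]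
    | c :: t =>
      by_cases hP : pvNoHead (c :: t)
      · rw [pvFold_cons pvMonthsB (fun _ h => h) c t hP]
        rw [pvScanB]
        rw [(pvFind_none_iff _).mpr hP]
        rw [ih t (by simpa using Nat.lt_succ_iff.mp (by simpa using hl))]
      · rw [pvNoHead] at hP
        push Not at hP
        obtain ⟨p, hp, hpre⟩ := hP
        obtain ⟨X, hX⟩ := hpre
        obtain ⟨a, b, cc, hp1, -⟩ := pvKey_shape p hp
        have hct : c :: t = p.1 ++ X := hX.symm
        rw [hct]
        rw [pvFold_key p hp pvMonthsB (fun _ h => h) X, if_pos hp]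
        -- scan side
        have hctl : c :: t = a :: b :: cc :: X := by rw [hct, hp1]; simp
        injection hctl with hc ht
        rw [hp1]
        simp only [List.cons_append, List.nil_append]
        rw [pvScanB]
        rw [show pvFindMonth (a :: b :: cc :: X) = some p by
          simpa [hp1] using pvFind_key p hp X]
        simp only [List.drop_succ_cons, List.drop_zero]
        rw [ih X (by subst ht; simp at hl; omega)]


def pvTable : List (String × String) :=
  [("Jan","Q1"),("Feb","Q1"),("Mar","Q1"),("Apr","Q2"),("May","Q2"),("Jun","Q2"),
   ("Jul","Q3"),("Aug","Q3"),("Sep","Q3"),("Oct","Q4"),("Nov","Q4"),("Dec","Q4")]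

def pvStepStr (acc : String) (p : String × String) : String :=
  if PySem.Str.isIn p.1 acc then PySem.Str.replace acc p.1 p.2 else acc

lemma A_eq_fold (s : String) :
    month_abrev_to_full_name s = pvTable.foldl pvStepStr s := rfl

lemma step_toList (p : String × String) (hk : p.1.toList ≠ []) (acc : String) :
    (pvStepStr acc p).toList = pvStepC acc.toList (p.1.toList, p.2.toList) := by
  rw [pvStepStr, pvStepC]
  by_cases h : PySem.Str.isIn p.1 acc
  · rw [if_pos h, PySem.Str.toList_replace, pvRep_eq_replace _ _ _ hk]
  · rw [if_neg h]
    have hinf : ¬ p.1.toList <:+: acc.toList := fun hi =>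
      h ((PySem.Str.isIn_iff_infix _ _).mpr hi)
    rw [pvRep_of_not_infix _ _ _ hinf]

lemma fold_toList_gen : ∀ (ps : List (String × String)) (s : String),
    (∀ p ∈ ps, p.1.toList ≠ []) →
    (ps.foldl pvStepStr s).toList =
      (ps.map (fun p => (p.1.toList, p.2.toList))).foldl pvStepC s.toList := by
  intro ps
  induction ps with
  | nil => intro s _; rfl
  | cons p ps ih =>
    intro s h
    simp only [List.map_cons, List.foldl_cons]
    rw [← step_toList p (h p (List.mem_cons_self ..)) s]
    exact ih _ (fun q hq => h q (List.mem_cons_of_mem _ hq))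

lemma fold_toList (s : String) :
    (pvTable.foldl pvStepStr s).toList = pvMonthsB.foldl pvStepC s.toList := by
  rw [fold_toList_gen pvTable s (by decide)]
  rfl

-- ===== VERDICT (by name: the statement is the Claim_ definition above) =====
theorem month_abrev_to_full_name_spec : Claim_equal_month_abrev_to_full_name := by
  intro s _
  unfold Spec_month_abrev_to_full_name month_abrev_to_full_name_alt
  rw [A_eq_fold s]
  apply String.toList_injective
  rw [fold_toList s, pvMain s.toList.length s.toList (Nat.le_refl _), String.toList_ofList]
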